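-- pv_equiv track=rewrite | github.com/bjourne/musicgen | musicgen/scode.py | produce_silence
-- ===== SOURCE A (Python) =====
-- MAX_COMPRESSED_SILENCE = 16
--
-- def produce_silence(delta, compress_silence):
--     if compress_silence:
--         delta = min(delta, MAX_COMPRESSED_SILENCE)
--     thresholds = [64, 32, 16, 8, 4, 3, 2, 1]
--     for threshold in thresholds:
--         while delta >= threshold:
--             yield threshold
--             delta -= threshold
--     assert delta == 0
-- ===== SOURCE B (Python) =====
-- MAX_COMPRESSED_SILENCE = 16
--
-- def produce_silence(delta, compress_silence):
--     # Closed-form decomposition instead of the greedy subtraction loops: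
--     # 64s come out of one divmod; the remainder (< 64) is written in its
--     # binary digits 32,16,8,4 (each at most once), and what is left is < 4,
--     # so it is a single token (3, 2 or 1) or nothing.
--     if compress_silence:
--         delta = min(delta, MAX_COMPRESSED_SILENCE)
--     assert delta >= 0
--     q, r = divmod(delta, 64)
--     yield from (64,) * q
--     for p in (32, 16, 8, 4):
--         if r >= p:
--             yield p
--             r -= p
--     if r:
--         yield r
-- ===== Notes on version B (the rewrite author's own statement) =====
-- stated objective: alternative
-- what changed: Replaces the greedy repeated-subtraction loops over all eight thresholds by a closed-form decomposition: one divmod extracts all 64-tokens at once, the remainder (< 64) is emitted as its binary digits over 32/16/8/4 (each at most once, no inner loop), and the final remainder (< 4) is emitted directly as a single token.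
import Mathlib
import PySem

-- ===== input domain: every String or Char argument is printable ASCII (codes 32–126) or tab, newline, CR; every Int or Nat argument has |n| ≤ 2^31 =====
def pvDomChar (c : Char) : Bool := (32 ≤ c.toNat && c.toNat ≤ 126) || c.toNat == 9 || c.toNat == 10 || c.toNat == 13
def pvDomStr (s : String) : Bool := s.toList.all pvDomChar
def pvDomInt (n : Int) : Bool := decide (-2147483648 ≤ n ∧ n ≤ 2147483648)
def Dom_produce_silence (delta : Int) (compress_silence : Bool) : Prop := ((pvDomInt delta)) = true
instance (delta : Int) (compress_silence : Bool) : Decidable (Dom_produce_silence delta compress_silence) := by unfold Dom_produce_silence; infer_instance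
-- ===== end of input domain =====

-- B replaces A's greedy subtraction loops by a closed-form decomposition
-- (one divmod by 64, then binary digits 32/16/8/4, then the remainder < 4);
-- return value = the list of yielded tokens (alternative decomposition).

-- ===== PORT A =====
-- 'while delta >= threshold: yield threshold; delta -= threshold'.
-- The '0 < t' conjunct is only a termination guard; every threshold A uses is positive.
def pyWhileA (t : Int) (delta : Int) : List Int × Int :=
  if h : 0 < t ∧ t ≤ delta then
    let rest := pyWhileA t (delta - t)
    (t :: rest.1, rest.2)
  else ([], delta)
termination_by delta.toNat
decreasing_by
  omega

def produce_silence (delta : Int) (compress_silence : Bool) : List Int :=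
  let delta := if compress_silence then min delta 16 else delta
  -- for threshold in thresholds: while … ; (assert delta == 0 is excluded by Pre_)
  (([64, 32, 16, 8, 4, 3, 2, 1] : List Int).foldl
    (fun st t => let w := pyWhileA t st.2; (st.1 ++ w.1, w.2)) ([], delta)).1

-- ===== PORT B =====
-- 'if r >= p: yield p; r -= p' inside 'for p in (32, 16, 8, 4)'
def bStep (st : List Int × Int) (p : Int) : List Int × Int :=
  if p ≤ st.2 then (st.1 ++ [p], st.2 - p) else st

def produce_silence_alt (delta : Int) (compress_silence : Bool) : List Int :=
  let delta := if compress_silence then min delta 16 else delta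
  -- q, r = divmod(delta, 64); yield from (64,) * q  (the assert is excluded by Pre_)
  let q := PySem.Int.floordiv delta 64
  let r := PySem.Int.mod delta 64
  let st := ([32, 16, 8, 4] : List Int).foldl bStep (List.replicate q.toNat 64, r)
  -- if r: yield r
  if st.2 ≠ 0 then st.1 ++ [st.2] else st.1

-- ===== PRECONDITION & SPEC =====
-- A's trailing 'assert delta == 0' fails (AssertionError) exactly when delta is
-- negative (compression keeps the sign); Pre_ excludes that.
def Pre_produce_silence (delta : Int) (compress_silence : Bool) : Prop := 0 ≤ delta
instance (delta : Int) (compress_silence : Bool) : Decidable (Pre_produce_silence delta compress_silence) := by unfold Pre_produce_silence; infer_instance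

def pvWitness_produce_silence : Int × Bool := (23, false)

def Spec_produce_silence (delta : Int) (compress_silence : Bool) (out : List Int) : Prop := out = produce_silence_alt delta compress_silence
instance (delta : Int) (compress_silence : Bool) (out : List Int) : Decidable (Spec_produce_silence delta compress_silence out) := by unfold Spec_produce_silence; infer_instance

-- ===== CLAIM (what is proved, stated in full; the proofs are below) =====
def Claim_equal_produce_silence : Prop := ∀ (delta : Int) (compress_silence : Bool), Dom_produce_silence delta compress_silence → Pre_produce_silence delta compress_silence → Spec_produce_silence delta compress_silence (produce_silence delta compress_silence)

-- ===== LEMMAS AND PROOFS =====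

-- A's inner while loop in one step: replicate (d // t) t and d % t.
def gStep (st : List Int × Int) (t : Int) : List Int × Int :=
  if t ≤ st.2 then
    (st.1 ++ List.replicate (PySem.Int.floordiv st.2 t).toNat t, PySem.Int.mod st.2 t)
  else st

theorem pyWhileA_eq (t : Int) (ht : 0 < t) (d : Int) :
    pyWhileA t d =
      if t ≤ d then (List.replicate (PySem.Int.floordiv d t).toNat t, PySem.Int.mod d t)
      else ([], d) := by
  rw [pyWhileA]
  by_cases hd : t ≤ d
  · have ih := pyWhileA_eq t ht (d - t)
    rw [dif_pos ⟨ht, hd⟩, ih]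
    have hdiv : PySem.Int.floordiv d t = PySem.Int.floordiv (d - t) t + 1 := by
      simp only [PySem.Int.floordiv_eq_ediv_of_pos (show (0:Int) < t by omega)]
      have : d = (d - t) + 1 * t := by ring
      rw [this, Int.add_mul_ediv_right _ _ (show t ≠ 0 by omega)]
      have h2 : d - t + 1 * t - t = d - t := by ring
      rw [h2]
    have hmod : PySem.Int.mod d t = PySem.Int.mod (d - t) t := by
      simp only [PySem.Int.mod_eq_emod_of_pos (show (0:Int) < t by omega)]
      have : d = (d - t) + 1 * t := by ring
      rw [this, Int.add_mul_emod_self_right]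
      have h2 : d - t + 1 * t - t = d - t := by ring
      rw [h2]
    by_cases hd2 : t ≤ d - t
    · have hq : 0 ≤ PySem.Int.floordiv (d - t) t := by
        rw [PySem.Int.floordiv_eq_ediv_of_pos (show (0:Int) < t by omega)]
        exact Int.ediv_nonneg (by omega) (by omega)
      rw [if_pos hd2, if_pos hd]
      simp only [hdiv, hmod]
      have : (PySem.Int.floordiv (d - t) t + 1).toNat
           = (PySem.Int.floordiv (d - t) t).toNat + 1 := by omega
      rw [this, List.replicate_succ]
    · rw [if_neg hd2, if_pos hd]
      have h1 : PySem.Int.floordiv d t = 1 := by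
        rw [(PySem.Int.floordiv_eq_iff_of_pos (by omega))]
        constructor <;> [omega; omega]
      have h2 : PySem.Int.mod d t = d - t := by
        have := PySem.Int.floordiv_mul_add_mod d t
        rw [h1] at this; omega
      simp [h1, h2]
  · rw [dif_neg (by omega), if_neg hd]
termination_by d.toNat
decreasing_by omega

theorem step_eq (st : List Int × Int) (t : Int) (ht : 0 < t) :
    (st.1 ++ (pyWhileA t st.2).1, (pyWhileA t st.2).2) = gStep st t := by
  simp only [pyWhileA_eq t ht st.2, gStep]
  by_cases h : t ≤ st.2 <;> simp [h]

theorem foldl_step_eq (l : List Int) (hl : ∀ t ∈ l, 0 < t) (st : List Int × Int) :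
    l.foldl (fun st t => (st.1 ++ (pyWhileA t st.2).1, (pyWhileA t st.2).2)) st
      = l.foldl gStep st := by
  induction l generalizing st with
  | nil => rfl
  | cons a l ih =>
    simp only [List.foldl_cons]
    rw [step_eq st a (hl a (by simp)), ih (fun t htl => hl t (by simp [htl]))]

-- When the remainder is below 2*p, A's step at p emits p at most once: it is B's step.
theorem step_match (st : List Int × Int) (p : Int) (hp : 0 < p)
    (h0 : 0 ≤ st.2) (h2 : st.2 < 2 * p) :
    gStep st p = bStep st p ∧ 0 ≤ (bStep st p).2 ∧ (bStep st p).2 < p := by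
  unfold gStep bStep
  by_cases h : p ≤ st.2
  · have h1 : PySem.Int.floordiv st.2 p = 1 := by
      rw [(PySem.Int.floordiv_eq_iff_of_pos (by omega))]
      constructor <;> [omega; omega]
    have hm : PySem.Int.mod st.2 p = st.2 - p := by
      have := PySem.Int.floordiv_mul_add_mod st.2 p
      rw [h1] at this; omega
    simp [h, h1, hm]
    omega
  · simp [h]
    omega

theorem mid_eq (st : List Int × Int) (h0 : 0 ≤ st.2) (h : st.2 < 64) :
    ([32, 16, 8, 4] : List Int).foldl gStep st = ([32, 16, 8, 4] : List Int).foldl bStep st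
  ∧ 0 ≤ (([32, 16, 8, 4] : List Int).foldl bStep st).2
  ∧ (([32, 16, 8, 4] : List Int).foldl bStep st).2 < 4 := by
  obtain ⟨e1, a1, b1⟩ := step_match st 32 (by norm_num) h0 (by omega)
  obtain ⟨e2, a2, b2⟩ := step_match (bStep st 32) 16 (by norm_num) a1 (by omega)
  obtain ⟨e3, a3, b3⟩ := step_match (bStep (bStep st 32) 16) 8 (by norm_num) a2 (by omega)
  obtain ⟨e4, a4, b4⟩ := step_match (bStep (bStep (bStep st 32) 16) 8) 4 (by norm_num) a3 (by omega)
  simp only [List.foldl_cons, List.foldl_nil, e1, e2, e3, e4]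
  exact ⟨trivial, a4, b4⟩

-- The remainder below 4 becomes a single token through thresholds 3, 2, 1.
theorem tail_eq (st : List Int × Int) (h0 : 0 ≤ st.2) (h : st.2 < 4) :
    (([3, 2, 1] : List Int).foldl gStep st).1
      = if st.2 ≠ 0 then st.1 ++ [st.2] else st.1 := by
  obtain ⟨out, r⟩ := st
  simp only at h0 h
  interval_cases r <;>
    simp [gStep, PySem.Int.floordiv, PySem.Int.mod, List.foldl_cons, List.foldl_nil]

-- First step: all the 64-tokens at once (for 0 ≤ d, whether or not 64 ≤ d).
theorem first_eq (d : Int) (hd : 0 ≤ d) :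
    gStep ([], d) 64
      = (List.replicate (PySem.Int.floordiv d 64).toNat 64, PySem.Int.mod d 64) := by
  unfold gStep
  by_cases h : (64 : Int) ≤ d
  · simp [h]
  · have h1 : PySem.Int.floordiv d 64 = 0 := by
      rw [(PySem.Int.floordiv_eq_iff_of_pos (by omega))]
      constructor <;> omega
    have hm : PySem.Int.mod d 64 = d := by
      have := PySem.Int.floordiv_mul_add_mod d 64
      rw [h1] at this; omega
    rw [if_neg h, h1, hm]
    simp

theorem core_eq (d : Int) (hd : 0 ≤ d) :
    ((([64, 32, 16, 8, 4, 3, 2, 1] : List Int).foldl gStep ([], d))).1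
      = (let q := PySem.Int.floordiv d 64
         let r := PySem.Int.mod d 64
         let st := ([32, 16, 8, 4] : List Int).foldl bStep (List.replicate q.toNat 64, r)
         if st.2 ≠ 0 then st.1 ++ [st.2] else st.1) := by
  have hsplit : ([64, 32, 16, 8, 4, 3, 2, 1] : List Int)
      = [64] ++ [32, 16, 8, 4] ++ [3, 2, 1] := rfl
  rw [hsplit, List.foldl_append, List.foldl_append]
  have h64 : ([64] : List Int).foldl gStep ([], d) = gStep ([], d) 64 := rfl
  rw [h64, first_eq d hd]
  have hr0 : 0 ≤ PySem.Int.mod d 64 := by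
    rw [PySem.Int.mod_eq_emod_of_pos (by norm_num)]
    exact Int.emod_nonneg d (by norm_num)
  have hr1 : PySem.Int.mod d 64 < 64 := by
    rw [PySem.Int.mod_eq_emod_of_pos (by norm_num)]
    exact Int.emod_lt_of_pos d (by norm_num)
  obtain ⟨e, a, b⟩ := mid_eq (List.replicate (PySem.Int.floordiv d 64).toNat 64,
      PySem.Int.mod d 64) hr0 hr1
  rw [e, tail_eq _ a (by omega)]

-- ===== VERDICT (by name: the statement is the Claim_ definition above) =====
theorem produce_silence_spec : Claim_equal_produce_silence := by
  intro delta compress_silence _ hpre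
  unfold Spec_produce_silence
  simp only [produce_silence, produce_silence_alt]
  have hd : 0 ≤ (if compress_silence then min delta 16 else delta) := by
    split <;> [exact le_min hpre (by norm_num); exact hpre]
  rw [foldl_step_eq _ (by decide), core_eq _ hd]
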